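-- pv_equiv track=rewrite | github.com/tarasivashchuk/Practice-Problems | src/practice_problems/solutions/check_closed_brackets.py | check_bracket_group
-- ===== SOURCE A (Python) =====
-- BRACKET_PAIRS = [("(", ")"), ("[", "]"), ("{", "}")]
--
-- def check_bracket_group(group):
--     """Checks whether the passed bracket group is closed."""
--     while len(group) > 1:
--         start = group.pop(0)
--         end = group.pop(-1)
--         if (start, end) not in BRACKET_PAIRS:
--             return False
--     if len(group) != 0:
--         return False
--     return True
-- ===== SOURCE B (Python) =====
-- BRACKET_PAIRS = [("(", ")"), ("[", "]"), ("{", "}")]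
--
-- def check_bracket_group(group):
--     """Checks whether the passed bracket group is closed.
--     Note: unlike the original, this does not mutate `group`."""
--     n = len(group)
--     if n % 2:
--         return False
--     return all((group[i], group[n - 1 - i]) in BRACKET_PAIRS for i in range(n // 2))
-- ===== Notes on version B (the rewrite author's own statement) =====
-- stated objective: simpler
-- what changed: Replaces the destructive pop(0)/pop(-1) while-loop with a non-mutating two-pointer index scan (even-length check plus comparing group[i] with group[n-1-i] for i < n//2).
import Mathlib
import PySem

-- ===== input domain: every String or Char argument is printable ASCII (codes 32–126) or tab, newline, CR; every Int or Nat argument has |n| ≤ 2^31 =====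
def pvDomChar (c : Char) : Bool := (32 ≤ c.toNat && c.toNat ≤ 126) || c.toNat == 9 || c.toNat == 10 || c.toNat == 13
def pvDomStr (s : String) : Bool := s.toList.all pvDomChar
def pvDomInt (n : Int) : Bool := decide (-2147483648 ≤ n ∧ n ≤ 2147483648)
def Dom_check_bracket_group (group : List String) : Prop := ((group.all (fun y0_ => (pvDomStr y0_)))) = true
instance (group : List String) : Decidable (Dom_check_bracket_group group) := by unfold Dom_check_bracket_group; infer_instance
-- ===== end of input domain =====

-- B replaces A's destructive pop(0)/pop(-1) loop with a non-mutating two-pointer index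
-- scan; equivalence is about the RETURN value only (Python A empties `group` in place,
-- B leaves it untouched).

def BRACKET_PAIRS : List (String × String) := [("(", ")"), ("[", "]"), ("{", "}")]

-- ===== PORT A =====
-- while len(group) > 1: start = pop(0); end = pop(-1); if (start,end) not in PAIRS: False
def check_bracket_group : List String → Bool
  | [] => true
  | [_] => false
  | s :: r :: rs =>
    let rest := r :: rs
    let e := rest.getLast (by simp)
    if (s, e) ∈ BRACKET_PAIRS then check_bracket_group rest.dropLast else false
termination_by xs => xs.length
decreasing_by simp

-- ===== PORT B =====
-- group[i] and group[n-1-i] are always in range for i < n/2, so getD is exact here.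
def check_bracket_group_alt (group : List String) : Bool :=
  let n := group.length
  decide (n % 2 = 0) &&
    (List.range (n / 2)).all
      (fun i => decide ((group.getD i "", group.getD (n - 1 - i) "") ∈ BRACKET_PAIRS))

-- ===== PRECONDITION & SPEC =====
def Spec_check_bracket_group (group : List String) (out : Bool) : Prop := out = check_bracket_group_alt group
instance (group : List String) (out : Bool) : Decidable (Spec_check_bracket_group group out) := by unfold Spec_check_bracket_group; infer_instance

-- ===== CLAIM (what is proved, stated in full; the proofs are below) =====
def Claim_equal_check_bracket_group : Prop := ∀ (group : List String), Dom_check_bracket_group group → Spec_check_bracket_group group (check_bracket_group group)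

-- ===== LEMMAS AND PROOFS =====

lemma all_congr_mem {α : Type} (l : List α) (p q : α → Bool)
    (h : ∀ x ∈ l, p x = q x) : l.all p = l.all q := by
  induction l with
  | nil => rfl
  | cons a t ih =>
    simp only [List.all_cons, h a (by simp), ih (fun x hx => h x (by simp [hx]))]

lemma alt_step (s e : String) (m : List String) :
    check_bracket_group_alt (s :: (m ++ [e]))
      = (decide ((s, e) ∈ BRACKET_PAIRS) && check_bracket_group_alt m) := by
  simp only [check_bracket_group_alt]
  have hlen : (s :: (m ++ [e])).length = m.length + 2 := by simp
  rw [hlen]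
  by_cases hpar : m.length % 2 = 0
  · have h2 : (m.length + 2) % 2 = 0 := by omega
    have hdiv : (m.length + 2) / 2 = m.length / 2 + 1 := by omega
    rw [hdiv, List.range_succ_eq_map]
    simp only [List.all_cons, List.all_map, h2, hpar, decide_true, Bool.true_and]
    have h0 : (s :: (m ++ [e])).getD 0 "" = s := rfl
    have hlast : (s :: (m ++ [e])).getD (m.length + 2 - 1 - 0) "" = e := by
      have : m.length + 2 - 1 - 0 = m.length + 1 := by omega
      rw [this]
      show (m ++ [e]).getD m.length "" = e
      simp [List.getD_eq_getElem?_getD]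
    rw [h0, hlast]
    congr 1
    apply all_congr_mem
    intro i hi
    have hi2 : i < m.length / 2 := by simpa using hi
    have him : i < m.length := by omega
    have hA : (s :: (m ++ [e])).getD (i + 1) "" = m.getD i "" := by
      show (m ++ [e]).getD i "" = m.getD i ""
      simp [List.getD_eq_getElem?_getD, List.getElem?_append_left him]
    have hidx : m.length + 2 - 1 - (i + 1) = m.length - i := by omega
    have hB : (s :: (m ++ [e])).getD (m.length - i) "" = m.getD (m.length - 1 - i) "" := by
      have h1 : m.length - i = (m.length - 1 - i) + 1 := by omega
      rw [h1]
      show (m ++ [e]).getD (m.length - 1 - i) "" = m.getD (m.length - 1 - i) ""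
      have : m.length - 1 - i < m.length := by omega
      simp [List.getD_eq_getElem?_getD, List.getElem?_append_left this]
    simp only [Function.comp, hA, hidx, hB]
  · simp [hpar]

lemma main_eq_aux : ∀ (n : Nat) (xs : List String), xs.length ≤ n →
    check_bracket_group xs = check_bracket_group_alt xs := by
  intro n
  induction n with
  | zero =>
    intro xs hlen
    have : xs = [] := by cases xs <;> simp_all
    subst this
    simp [check_bracket_group, check_bracket_group_alt]
  | succ k ih =>
    intro xs hlen
    match xs with
    | [] => simp [check_bracket_group, check_bracket_group_alt]
    | [x] => simp [check_bracket_group, check_bracket_group_alt]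
    | s :: r :: rs =>
      have hne : (r :: rs) ≠ [] := by simp
      have hlen2 : ((r :: rs).dropLast).length ≤ k := by
        simp at hlen ⊢; omega
      have hdecomp : r :: rs = (r :: rs).dropLast ++ [(r :: rs).getLast hne] :=
        (List.dropLast_concat_getLast hne).symm
      simp only [check_bracket_group]
      conv_rhs => rw [hdecomp]
      rw [alt_step, ih _ hlen2]
      by_cases h : (s, (r :: rs).getLast hne) ∈ BRACKET_PAIRS <;> simp [h]

lemma main_eq (xs : List String) :
    check_bracket_group xs = check_bracket_group_alt xs :=
  main_eq_aux xs.length xs (le_refl _)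

-- ===== VERDICT (by name: the statement is the Claim_ definition above) =====
theorem check_bracket_group_spec : Claim_equal_check_bracket_group := by
  intro group _
  unfold Spec_check_bracket_group
  exact main_eq group
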